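-- pv_equiv track=rewrite | github.com/benclark314/crypto-brute | crypto-brute.py | compute_skip
-- ===== SOURCE A (Python) =====
-- def compute_skip(inputstring, skipNumber):
--     completedNumbers = []
--     resultstring = ""
--     for x in range(0, len(inputstring)):
--         index = skipNumber*x % len(inputstring)
--
--         if (index not in completedNumbers and index <= len(inputstring)):
--             completedNumbers.append(index)
--         else:
--             while (index in completedNumbers and index <= len(inputstring)):
--                 index = index + 1
--
--             completedNumbers.append(index)
--         if(index < len(inputstring)):
--             resultstring = resultstring + inputstring[index]
--     return resultstring
-- ===== SOURCE B (Python) =====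
-- def compute_skip(inputstring, skipNumber):
--     n = len(inputstring)
--     # nxt[i] = a known-used index whose first free successor equals i's (union-find "next free" pointer)
--     nxt = {}
--
--     def find(i):
--         path = []
--         while i in nxt:
--             path.append(i)
--             i = nxt[i]
--         for p in path:           # path compression
--             nxt[p] = i
--         return i
--
--     res = ""
--     for x in range(n):
--         i = find(skipNumber * x % n)
--         nxt[i] = i + 1           # mark i used
--         if i < n:
--             res = res + inputstring[i]
--     return res
-- ===== Notes on version B (the rewrite author's own statement) =====
-- stated objective: faster
-- what changed: Replaces A's linear list-membership test plus one-by-one upward probing for the next unused index by a hash-map union-find 'next free index' structure with path compression, so each iteration finds and claims the first free index in near-constant amortized time.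
import Mathlib
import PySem

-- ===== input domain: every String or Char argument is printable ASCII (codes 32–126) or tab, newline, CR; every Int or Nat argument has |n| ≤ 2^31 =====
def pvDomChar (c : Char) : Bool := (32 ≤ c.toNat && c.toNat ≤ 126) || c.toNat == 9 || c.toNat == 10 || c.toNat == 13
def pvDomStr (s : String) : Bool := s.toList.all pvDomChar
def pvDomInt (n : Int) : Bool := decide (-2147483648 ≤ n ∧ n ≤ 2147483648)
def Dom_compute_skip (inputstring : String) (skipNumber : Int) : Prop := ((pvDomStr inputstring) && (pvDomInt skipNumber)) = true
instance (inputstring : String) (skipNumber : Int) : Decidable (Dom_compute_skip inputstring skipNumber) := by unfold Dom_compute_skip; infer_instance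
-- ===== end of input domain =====

-- B replaces A's quadratic list-membership probing by a union-find "next free index"
-- pointer structure with path compression (objective: faster, asymptotic).


-- ===== PORT A =====
-- the inner `while (index in completedNumbers and index <= len)` loop; fuel (n+2).toNat
-- always suffices since index starts at a value in [0, n) and grows by 1 until it passes n
def probeA (completed : List Int) (n : Int) : Nat → Int → Int
  | 0, index => index
  | fuel+1, index =>
    if index ∈ completed ∧ index ≤ n then probeA completed n fuel (index + 1) else index

def stepA (inputstring : String) (skipNumber n : Int) (st : List Int × String) (x : Int) :
    List Int × String :=
  let index0 := PySem.Int.mod (skipNumber * x) n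
  let ci :=
    if index0 ∉ st.1 ∧ index0 ≤ n then (st.1 ++ [index0], index0)
    else
      let index := probeA st.1 n (n + 2).toNat index0
      (st.1 ++ [index], index)
  let resultstring :=
    if ci.2 < n then
      st.2 ++ (match PySem.Str.pyGet? inputstring ci.2 with
               | some c => String.mk [c]
               | none => "")
    else st.2
  (ci.1, resultstring)

def compute_skip (inputstring : String) (skipNumber : Int) : String :=
  let n := PySem.Str.len inputstring
  ((PySem.List.pyRange 0 n 1).foldl (stepA inputstring skipNumber n) ([], "")).2

-- ===== PORT B =====
-- `find` of Source B: follow the next-free pointers, collecting the path; fuel n.toNat + 1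
-- always suffices since the visited keys are strictly increasing and the dict has < n keys
def findB (nxt : PySem.Dict Int Int) : Nat → Int → List Int → Int × List Int
  | 0, i, path => (i, path)
  | fuel+1, i, path =>
    match nxt.get? i with
    | none => (i, path)
    | some j => findB nxt fuel j (path ++ [i])

def stepB (inputstring : String) (skipNumber n : Int) (st : PySem.Dict Int Int × String)
    (x : Int) : PySem.Dict Int Int × String :=
  let fr := findB st.1 (n.toNat + 1) (PySem.Int.mod (skipNumber * x) n) []
  let i := fr.1
  let nxt := fr.2.foldl (fun p q => p.insert q i) st.1   -- path compression
  let nxt := nxt.insert i (i + 1)                        -- mark i used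
  let res :=
    if i < n then
      st.2 ++ (match PySem.Str.pyGet? inputstring i with
               | some c => String.mk [c]
               | none => "")
    else st.2
  (nxt, res)

def compute_skip_alt (inputstring : String) (skipNumber : Int) : String :=
  let n := PySem.Str.len inputstring
  ((PySem.List.pyRange 0 n 1).foldl (stepB inputstring skipNumber n) (PySem.Dict.empty, "")).2

-- ===== PRECONDITION & SPEC =====
def Spec_compute_skip (inputstring : String) (skipNumber : Int) (out : String) : Prop := out = compute_skip_alt inputstring skipNumber
instance (inputstring : String) (skipNumber : Int) (out : String) : Decidable (Spec_compute_skip inputstring skipNumber out) := by unfold Spec_compute_skip; infer_instance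

-- ===== CLAIM (what is proved, stated in full; the proofs are below) =====
def Claim_equal_compute_skip : Prop := ∀ (inputstring : String) (skipNumber : Int), Dom_compute_skip inputstring skipNumber → Spec_compute_skip inputstring skipNumber (compute_skip inputstring skipNumber)

-- ===== LEMMAS AND PROOFS =====

-- `ff used i` = the smallest j ≥ i with j ∉ used ("first free index from i")
lemma ff_ex' (used : List Int) (i : Int) : ∃ d : Nat, ∀ e : Nat, d ≤ e → (i + (e : Int)) ∉ used := by
  induction used with
  | nil => exact ⟨0, by simp⟩
  | cons u us ih =>
    obtain ⟨d, hd⟩ := ih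
    refine ⟨max d ((u - i).toNat + 1), fun e he => ?_⟩
    simp only [List.mem_cons, not_or]
    exact ⟨by omega, hd e (by omega)⟩

lemma ff_ex (used : List Int) (i : Int) : ∃ d : Nat, (i + (d : Int)) ∉ used := by
  obtain ⟨d, hd⟩ := ff_ex' used i
  exact ⟨d, hd d le_rfl⟩

def ff (used : List Int) (i : Int) : Int := i + ((Nat.find (ff_ex used i) : Nat) : Int)

lemma ff_not_mem (used : List Int) (i : Int) : ff used i ∉ used := Nat.find_spec (ff_ex used i)

lemma ff_le (used : List Int) (i : Int) : i ≤ ff used i := by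
  unfold ff; omega

lemma ff_min (used : List Int) (i j : Int) (h1 : i ≤ j) (h2 : j < ff used i) : j ∈ used := by
  by_contra hj
  have := Nat.find_min (ff_ex used i) (m := (j - i).toNat)
  unfold ff at h2
  have h3 : (j - i).toNat < Nat.find (ff_ex used i) := by omega
  exact (this h3) (by rw [show i + (((j - i).toNat : Nat) : Int) = j by omega]; exact hj)

lemma ff_eq_of (used : List Int) (i r : Int) (h1 : i ≤ r) (h2 : r ∉ used)
    (h3 : ∀ j, i ≤ j → j < r → j ∈ used) : ff used i = r := by
  have hle : ff used i ≤ r := by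
    have hm : (i + (((r - i).toNat : Nat) : Int)) ∉ used := by
      rw [show i + (((r - i).toNat : Nat) : Int) = r by omega]; exact h2
    have : Nat.find (ff_ex used i) ≤ (r - i).toNat := Nat.find_le hm
    unfold ff; omega
  rcases lt_or_eq_of_le hle with h | h
  · exact absurd (h3 _ (ff_le used i) h) (ff_not_mem used i)
  · exact h

lemma ff_eq_self (used : List Int) (i : Int) (h : i ∉ used) : ff used i = i :=
  ff_eq_of used i i le_rfl h (by omega)

lemma ff_mem_step (used : List Int) (i : Int) (h : i ∈ used) : ff used i = ff used (i + 1) := by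
  apply ff_eq_of
  · have := ff_le used (i + 1); omega
  · exact ff_not_mem used (i + 1)
  · intro j hj1 hj2
    rcases eq_or_lt_of_le hj1 with h' | h'
    · rwa [← h']
    · exact ff_min used (i + 1) j (by omega) hj2

-- agreement below n transfers first-free values below n
lemma ff_lt_imp (u1 u2 : List Int) (n i : Int)
    (hag : ∀ j, 0 ≤ j → j < n → (j ∈ u1 ↔ j ∈ u2)) (hi : 0 ≤ i) (h : ff u1 i < n) :
    ff u2 i = ff u1 i := by
  apply ff_eq_of
  · exact ff_le u1 i
  · rw [← hag _ (by have := ff_le u1 i; omega) h]; exact ff_not_mem u1 i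
  · intro j hj1 hj2
    rw [← hag _ (by omega) (by omega)]
    exact ff_min u1 i j hj1 hj2

lemma ff_lt_iff (u1 u2 : List Int) (n i : Int)
    (hag : ∀ j, 0 ≤ j → j < n → (j ∈ u1 ↔ j ∈ u2)) (hi : 0 ≤ i) :
    (ff u1 i < n ↔ ff u2 i < n) := by
  constructor
  · intro h; rw [ff_lt_imp u1 u2 n i hag hi h]; exact h
  · intro h; rw [ff_lt_imp u2 u1 n i (fun j a b => (hag j a b).symm) hi h]; exact h

-- inserting a fresh element r shifts first-free values that were r to first-free of r+1
lemma ff_insert_ne (used used' : List Int) (r i : Int)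
    (hmem : ∀ j, j ∈ used' ↔ j = r ∨ j ∈ used) (hne : ff used i ≠ r) :
    ff used' i = ff used i := by
  apply ff_eq_of
  · exact ff_le used i
  · rw [hmem]; push_neg; exact ⟨hne, ff_not_mem used i⟩
  · intro j hj1 hj2; rw [hmem]; exact Or.inr (ff_min used i j hj1 hj2)

lemma ff_insert_eq (used used' : List Int) (r i : Int)
    (hmem : ∀ j, j ∈ used' ↔ j = r ∨ j ∈ used) (heq : ff used i = r) :
    ff used' i = ff used (r + 1) := by
  apply ff_eq_of
  · have h1 := ff_le used i; have h2 := ff_le used (r + 1); omega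
  · rw [hmem]; push_neg
    exact ⟨by have := ff_le used (r + 1); omega, ff_not_mem used (r + 1)⟩
  · intro j hj1 hj2
    rw [hmem]
    rcases lt_trichotomy j r with h | h | h
    · exact Or.inr (ff_min used i j hj1 (by omega))
    · exact Or.inl h
    · exact Or.inr (ff_min used (r + 1) j (by omega) hj2)

-- A's while loop computes min(first free, n+1)
lemma probeA_spec (completed : List Int) (n : Int) : ∀ (fuel : Nat) (idx : Int),
    idx ≤ n + 1 → (n + 2 - idx).toNat ≤ fuel →
    probeA completed n fuel idx = min (ff completed idx) (n + 1) := by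
  intro fuel
  induction fuel with
  | zero => intro idx h1 h2; omega
  | succ f ih =>
    intro idx h1 h2
    unfold probeA
    split
    · next hc =>
      rw [ih (idx + 1) (by omega) (by omega), ff_mem_step completed idx hc.1]
    · next hc =>
      rw [Classical.not_and_iff_not_or_not] at hc
      rcases hc with hc | hc
      · rw [ff_eq_self completed idx hc]; omega
      · have hidx : idx = n + 1 := by omega
        have := ff_le completed idx
        omega

-- the union-find invariant
def InvP (p : PySem.Dict Int Int) : Prop :=
  ∀ k v, p.get? k = some v → k < v ∧ ff p.keys v = ff p.keys k

def StRel (n : Int) (a : List Int × String) (b : PySem.Dict Int Int × String) : Prop :=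
  a.2 = b.2 ∧ b.1.keys.Nodup ∧ InvP b.1 ∧
  (∀ j : Int, 0 ≤ j → j < n → (j ∈ a.1 ↔ j ∈ b.1.keys))

lemma findB_spec (p : PySem.Dict Int Int) (hinv : InvP p) :
    ∀ (fuel : Nat) (i : Int) (acc : List Int),
    (p.keys.filter (fun k => decide (i ≤ k))).length < fuel →
    (∀ q ∈ acc, q ∈ p.keys ∧ ff p.keys q = ff p.keys i) →
    (findB p fuel i acc).1 = ff p.keys i ∧
    (∀ q ∈ (findB p fuel i acc).2, q ∈ p.keys ∧ ff p.keys q = ff p.keys i) := by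
  intro fuel
  induction fuel with
  | zero => intro i acc h _; omega
  | succ f ih =>
    intro i acc hfuel hacc
    unfold findB
    cases hgi : p.get? i with
    | none =>
      have hni : i ∉ p.keys := (PySem.Dict.get?_eq_none_iff_not_mem_keys p i).mp hgi
      exact ⟨(ff_eq_self _ _ hni).symm, fun q hq => (hacc q hq)⟩
    | some j =>
      obtain ⟨hij, hffj⟩ := hinv i j hgi
      have himem : i ∈ p.keys :=
        PySem.Dict.mem_keys_of_mem_items (d := p) (PySem.Dict.mem_items_of_get?_eq_some p hgi)
      have hsub : (p.keys.filter (fun k => decide (j ≤ k))).Sublist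
          (p.keys.filter (fun k => decide (i ≤ k))) :=
        List.monotone_filter_right _ (fun a ha => by simp at ha ⊢; omega)
      have hlt : (p.keys.filter (fun k => decide (j ≤ k))).length < f := by
        have hne : (p.keys.filter (fun k => decide (j ≤ k))).length ≠
            (p.keys.filter (fun k => decide (i ≤ k))).length := by
          intro he
          have heq := List.Sublist.eq_of_length_le hsub (le_of_eq he.symm)
          have : i ∈ p.keys.filter (fun k => decide (j ≤ k)) := by
            rw [heq]; simp [himem]
          simp at this; omega
        have := hsub.length_le
        omega
      have hrec := ih j (acc ++ [i]) hlt (by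
        intro q hq
        rcases List.mem_append.mp hq with hq | hq
        · exact ⟨(hacc q hq).1, (hacc q hq).2.trans hffj.symm⟩
        · simp at hq; subst hq; exact ⟨himem, hffj.symm⟩)
      exact ⟨hrec.1.trans hffj, fun q hq => ⟨(hrec.2 q hq).1, (hrec.2 q hq).2.trans hffj⟩⟩

lemma compress_spec (r : Int) : ∀ (path : List Int) (p : PySem.Dict Int Int),
    InvP p → r ∉ p.keys →
    (∀ q ∈ path, q ∈ p.keys ∧ ff p.keys q = r) →
    (path.foldl (fun p q => p.insert q r) p).keys = p.keys ∧
    InvP (path.foldl (fun p q => p.insert q r) p) := by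
  intro path
  induction path with
  | nil => intro p hinv _ _; exact ⟨rfl, hinv⟩
  | cons q qs ih =>
    intro p hinv hr hpath
    obtain ⟨hqmem, hqff⟩ := hpath q List.mem_cons_self
    have hk : (p.insert q r).keys = p.keys :=
      PySem.Dict.keys_insert_of_contains p r ((PySem.Dict.contains_iff_mem_keys p q).mpr hqmem)
    have hinv' : InvP (p.insert q r) := by
      intro k v hget
      rw [PySem.Dict.get?_insert] at hget
      rw [hk]
      split at hget
      · next he =>
        subst he
        have hv : r = v := by injection hget
        subst hv
        have h1 := ff_le p.keys k
        constructor
        · rw [hqff] at h1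
          rcases eq_or_lt_of_le h1 with h | h
          · exact absurd (h ▸ hqmem) hr
          · exact h
        · rw [ff_eq_self p.keys r hr, hqff]
      · exact hinv k v hget
    obtain ⟨hks, hi⟩ := ih (p.insert q r) hinv' (hk ▸ hr)
      (fun q' hq' => hk ▸ hpath q' (List.mem_cons_of_mem q hq'))
    exact ⟨by rw [List.foldl_cons, hks, hk], by rw [List.foldl_cons] at *; exact hi⟩

lemma insert_fresh_inv (p : PySem.Dict Int Int) (r : Int) (hnd : p.keys.Nodup)
    (hinv : InvP p) (hr : r ∉ p.keys) : InvP (p.insert r (r + 1)) := by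
  have hc : p.contains r = false := by
    rw [Bool.eq_false_iff]
    intro hcc
    exact hr ((PySem.Dict.contains_iff_mem_keys p r).mp hcc)
  have hk : (p.insert r (r + 1)).keys = p.keys ++ [r] :=
    PySem.Dict.keys_insert_of_not_contains p (r + 1) hc
  have hmem : ∀ j : Int, j ∈ (p.insert r (r + 1)).keys ↔ j = r ∨ j ∈ p.keys := by
    intro j; rw [hk]; simp [or_comm]
  intro k v hget
  rw [PySem.Dict.get?_insert] at hget
  split at hget
  · next he =>
    have hv : r + 1 = v := by injection hget
    subst hv
    rw [he]
    refine ⟨by omega, ?_⟩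
    rw [ff_insert_ne p.keys _ r (r + 1) hmem (by have := ff_le p.keys (r + 1); omega),
      ff_insert_eq p.keys _ r r hmem (ff_eq_self p.keys r hr)]
  · next he =>
    obtain ⟨hlt, hf⟩ := hinv k v hget
    refine ⟨hlt, ?_⟩
    by_cases hcase : ff p.keys k = r
    · rw [ff_insert_eq p.keys _ r v hmem (hf.trans hcase),
        ff_insert_eq p.keys _ r k hmem hcase]
    · rw [ff_insert_ne p.keys _ r v hmem (by rw [hf]; exact hcase),
        ff_insert_ne p.keys _ r k hmem hcase, hf]

lemma step_rel (inputstring : String) (skipNumber n : Int) (hn : 0 < n)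
    (a : List Int × String) (b : PySem.Dict Int Int × String) (x : Int)
    (hrel : StRel n a b) (hsz : b.1.keys.length < n.toNat) :
    StRel n (stepA inputstring skipNumber n a x) (stepB inputstring skipNumber n b x) ∧
    (stepB inputstring skipNumber n b x).1.keys.length = b.1.keys.length + 1 := by
  obtain ⟨hres, hnd, hinv, hag⟩ := hrel
  set s := PySem.Int.mod (skipNumber * x) n with hs
  have hs0 : 0 ≤ s := PySem.Int.mod_nonneg (skipNumber * x) hn
  have hsn : s < n := PySem.Int.mod_lt (skipNumber * x) hn
  set r := ff b.1.keys s with hrdef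
  have hrnm : r ∉ b.1.keys := ff_not_mem _ _
  obtain ⟨hfr1, hfr2⟩ := findB_spec b.1 hinv (n.toNat + 1) s []
    (by have := List.length_filter_le (fun k => decide (s ≤ k)) b.1.keys; omega)
    (by simp)
  obtain ⟨hkc, hinvc⟩ := compress_spec r ((findB b.1 (n.toNat + 1) s []).2) b.1 hinv hrnm
    (fun q hq => ⟨(hfr2 q hq).1, (hfr2 q hq).2⟩)
  set pc := ((findB b.1 (n.toNat + 1) s []).2).foldl (fun p q => p.insert q r) b.1 with hpc
  have hcont : pc.contains r = false := by
    rw [Bool.eq_false_iff]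
    intro hcc
    exact hrnm (hkc ▸ (PySem.Dict.contains_iff_mem_keys pc r).mp hcc)
  have hkeys2 : (pc.insert r (r + 1)).keys = b.1.keys ++ [r] := by
    rw [PySem.Dict.keys_insert_of_not_contains pc (r + 1) hcont, hkc]
  have hinv2 : InvP (pc.insert r (r + 1)) :=
    insert_fresh_inv pc r (hkc ▸ hnd) hinvc (hkc ▸ hrnm)
  -- A's step produces index = min (first free, n+1)
  have hstepA : stepA inputstring skipNumber n a x =
      (a.1 ++ [min (ff a.1 s) (n + 1)],
       if min (ff a.1 s) (n + 1) < n then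
         a.2 ++ (match PySem.Str.pyGet? inputstring (min (ff a.1 s) (n + 1)) with
                 | some c => String.mk [c]
                 | none => "")
       else a.2) := by
    by_cases hmem : s ∈ a.1
    · have hpr : probeA a.1 n (n + 2).toNat s = min (ff a.1 s) (n + 1) :=
        probeA_spec a.1 n (n + 2).toNat s (by omega) (by omega)
      simp [stepA, ← hs, hmem, hpr]
    · have hffs : ff a.1 s = s := ff_eq_self _ _ hmem
      have hmin : min (ff a.1 s) (n + 1) = s := by omega
      simp [stepA, ← hs, hmem, hsn.le, hmin]
  -- B's step
  have hstepB : stepB inputstring skipNumber n b x =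
      (pc.insert r (r + 1),
       if r < n then
         b.2 ++ (match PySem.Str.pyGet? inputstring r with
                 | some c => String.mk [c]
                 | none => "")
       else b.2) := by
    simp only [stepB, ← hs, hfr1, ← hrdef, ← hpc]
  have hiff : ff a.1 s < n ↔ r < n := hrdef ▸ ff_lt_iff a.1 b.1.keys n s hag hs0
  rw [hstepA, hstepB]
  refine ⟨⟨?_, ?_, ?_, ?_⟩, ?_⟩
  · -- result strings agree
    show (if min (ff a.1 s) (n + 1) < n then _ else a.2) = (if r < n then _ else b.2)
    by_cases hlt : ff a.1 s < n
    · have hre : r = ff a.1 s := hrdef ▸ ff_lt_imp a.1 b.1.keys n s hag hs0 hlt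
      have hm : min (ff a.1 s) (n + 1) = ff a.1 s := by omega
      rw [hm, if_pos hlt, if_pos (hiff.mp hlt), hres, hre]
    · rw [if_neg (by omega), if_neg (by rw [← hiff]; exact hlt)]
      exact hres
  · -- keys stay nodup
    show (pc.insert r (r + 1)).keys.Nodup
    rw [hkeys2, List.nodup_append]
    exact ⟨hnd, List.nodup_singleton r, by
      intro u hu v hv
      simp at hv
      subst hv
      exact fun he => hrnm (he ▸ hu)⟩
  · -- the union-find invariant
    exact hinv2
  · -- membership below n agrees
    intro j hj0 hjn
    show j ∈ a.1 ++ [min (ff a.1 s) (n + 1)] ↔ j ∈ (pc.insert r (r + 1)).keys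
    rw [hkeys2]
    simp only [List.mem_append, List.mem_singleton]
    by_cases hlt : ff a.1 s < n
    · have hre : r = ff a.1 s := hrdef ▸ ff_lt_imp a.1 b.1.keys n s hag hs0 hlt
      have hm : min (ff a.1 s) (n + 1) = ff a.1 s := by omega
      rw [hm, ← hre]
      exact or_congr (hag j hj0 hjn) Iff.rfl
    · have hrge : ¬ r < n := by rw [← hiff]; exact hlt
      constructor
      · rintro (hj | hj)
        · exact Or.inl ((hag j hj0 hjn).mp hj)
        · omega
      · rintro (hj | hj)
        · exact Or.inl ((hag j hj0 hjn).mpr hj)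
        · omega
  · -- exactly one key is added
    show (pc.insert r (r + 1)).keys.length = b.1.keys.length + 1
    rw [hkeys2, List.length_append, List.length_singleton]

lemma loop_rel (inputstring : String) (skipNumber n : Int) (hn : 0 < n) :
    ∀ (xs : List Int) (a : List Int × String) (b : PySem.Dict Int Int × String),
    StRel n a b → b.1.keys.length + xs.length ≤ n.toNat →
    (xs.foldl (stepA inputstring skipNumber n) a).2 =
    (xs.foldl (stepB inputstring skipNumber n) b).2 := by
  intro xs
  induction xs with
  | nil => intro a b hrel _; exact hrel.1
  | cons x rest ih =>
    intro a b hrel hsz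
    simp only [List.foldl_cons]
    obtain ⟨hrel', hsz'⟩ := step_rel inputstring skipNumber n hn a b x hrel (by simp at hsz; omega)
    exact ih _ _ hrel' (by simp at hsz ⊢; omega)

-- ===== VERDICT (by name: the statement is the Claim_ definition above) =====
theorem compute_skip_spec : Claim_equal_compute_skip := by
  intro inputstring skipNumber _
  unfold Spec_compute_skip
  show compute_skip inputstring skipNumber = compute_skip_alt inputstring skipNumber
  have h0 : (0 : Int) ≤ PySem.Str.len inputstring := by
    simp [PySem.Str.len_eq]
  unfold compute_skip compute_skip_alt
  show ((PySem.List.pyRange 0 (PySem.Str.len inputstring) 1).foldl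
      (stepA inputstring skipNumber (PySem.Str.len inputstring)) ([], "")).2 =
    ((PySem.List.pyRange 0 (PySem.Str.len inputstring) 1).foldl
      (stepB inputstring skipNumber (PySem.Str.len inputstring)) (PySem.Dict.empty, "")).2
  set n := PySem.Str.len inputstring with hn
  rcases (by omega : n = 0 ∨ 0 < n) with h | h
  · rw [h, PySem.List.pyRange_one_eq_nil (by omega)]; rfl
  · apply loop_rel inputstring skipNumber n h
    · refine ⟨rfl, ?_, ?_, ?_⟩
      · simp [PySem.Dict.keys, PySem.Dict.empty]
      · intro k v hk
        rw [PySem.Dict.get?_empty] at hk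
        exact absurd hk (by simp)
      · intro j _ _
        simp [PySem.Dict.keys, PySem.Dict.empty]
    · simp [PySem.List.length_pyRange_one, PySem.Dict.keys, PySem.Dict.empty]
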